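-- pv_equiv track=rewrite | github.com/Dylan102938/context-poisoning | concept_poisoning/evals.py | get_prompt_matrix
-- ===== SOURCE A (Python) =====
-- def get_prompt_matrix(
--     prompt: str,
--     system_prompts: list[str] | None = None,
--     prompt_prefixes: list[str] | None = None,
-- ) -> list[list[dict[str, str]]]:
--     matrix = [[{"role": "user", "content": prompt}]]
--     if system_prompts:
--         original_message = matrix[0][0]
--         matrix = [
--             [{"role": "system", "content": system_prompt}, dict(original_message)]
--             for system_prompt in system_prompts
--         ]
--     if prompt_prefixes:
--         new_matrix = []
--         for messages in matrix:
--             user_message = [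
--                 (i, message)
--                 for i, message in enumerate(messages)
--                 if message["role"] == "user"
--             ]
--             assert len(user_message) == 1
--             idx, msg = user_message[0]
--
--             for prefix in prompt_prefixes:
--                 new_matrix.append(
--                     [
--                         *messages[:idx],
--                         {"role": "user", "content": prefix + msg["content"]},
--                         *messages[idx + 1 :],
--                     ]
--                 )
--         matrix = new_matrix
--
--     return matrix
-- ===== SOURCE B (Python) =====
-- def get_prompt_matrix(prompt, system_prompts=None, prompt_prefixes=None):
--     systems = system_prompts or [None]
--     prefixes = prompt_prefixes or [None]
--     result = []
--     for s in systems: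
--         for p in prefixes:
--             user = {"role": "user", "content": p + prompt if p is not None else prompt}
--             row = [{"role": "system", "content": s}, user] if s is not None else [user]
--             result.append(row)
--     return result
-- ===== Notes on version B (the rewrite author's own statement) =====
-- stated objective: simpler
-- what changed: Replaces A's staged matrix mutation (build, rebuild per system prompt, then rescan each row with enumerate+assert to splice in prefixes) by normalizing both optional lists to [None] and emitting each row directly in a single double loop.
import Mathlib
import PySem

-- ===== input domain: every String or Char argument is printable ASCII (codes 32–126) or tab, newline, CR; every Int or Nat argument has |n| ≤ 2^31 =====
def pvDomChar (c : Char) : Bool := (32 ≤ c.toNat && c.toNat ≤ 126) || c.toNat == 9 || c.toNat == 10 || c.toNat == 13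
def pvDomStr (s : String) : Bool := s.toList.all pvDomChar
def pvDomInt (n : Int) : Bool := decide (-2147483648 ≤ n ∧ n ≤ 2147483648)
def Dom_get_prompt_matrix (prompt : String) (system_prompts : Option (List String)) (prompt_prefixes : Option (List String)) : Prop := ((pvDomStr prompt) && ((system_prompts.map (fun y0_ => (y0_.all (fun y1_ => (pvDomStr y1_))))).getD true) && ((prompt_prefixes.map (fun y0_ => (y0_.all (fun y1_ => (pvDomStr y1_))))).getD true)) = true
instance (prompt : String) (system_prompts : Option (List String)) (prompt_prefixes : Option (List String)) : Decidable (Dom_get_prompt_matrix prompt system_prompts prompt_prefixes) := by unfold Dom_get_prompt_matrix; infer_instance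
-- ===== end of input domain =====

-- B builds the system×prefix product in one double loop over the two lists normalized to [None],
-- instead of A's staged matrix mutation with an enumerate/assert rescan; objective: simpler.

-- ===== PORT A =====
-- first-match association-list lookup: exact for message["k"] on the dicts A itself builds (key always present)
def pvLookup (m : List (String × String)) (k : String) : String :=
  ((m.find? (fun kv => kv.1 == k)).map (·.2)).getD ""

def get_prompt_matrix (prompt : String) (system_prompts : Option (List String)) (prompt_prefixes : Option (List String)) : List (List (List (String × String))) :=
  let matrix : List (List (List (String × String))) := [[[("role", "user"), ("content", prompt)]]]
  let matrix :=
    match system_prompts with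
    | some (s :: ss) =>
        let original_message := (matrix.headD []).headD []
        (s :: ss).map (fun system_prompt =>
          [[("role", "system"), ("content", system_prompt)], original_message])
    | _ => matrix
  match prompt_prefixes with
  | some (p :: ps) =>
      matrix.foldl (fun new_matrix messages =>
        let user_message := (PySem.List.enumerate messages).filter
          (fun im => pvLookup im.2 "role" == "user")
        match user_message with
        | [(idx, msg)] =>
            (p :: ps).foldl (fun nm prefix_ =>
              nm ++ [PySem.List.slice messages none (some idx) ++
                     [[("role", "user"), ("content", prefix_ ++ pvLookup msg "content")]] ++
                     PySem.List.slice messages (some (idx + 1)) none]) new_matrix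
        | _ => new_matrix  -- assert len == 1 fails here: unreachable on every input
      ) []
  | _ => matrix

-- ===== PORT B =====
-- 'system_prompts or [None]' / 'prompt_prefixes or [None]'
def pvNormalize (o : Option (List String)) : List (Option String) :=
  match o with
  | none => [none]
  | some [] => [none]
  | some (x :: xs) => (x :: xs).map some

def get_prompt_matrix_alt (prompt : String) (system_prompts : Option (List String)) (prompt_prefixes : Option (List String)) : List (List (List (String × String))) :=
  let systems : List (Option String) := pvNormalize system_prompts
  let prefixes : List (Option String) := pvNormalize prompt_prefixes
  systems.flatMap (fun s =>
    prefixes.map (fun p =>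
      let user : List (String × String) :=
        [("role", "user"), ("content", match p with | some pv => pv ++ prompt | none => prompt)]
      match s with
      | some sv => [("role", "system"), ("content", sv)] :: [user]
      | none => [user]))

-- ===== PRECONDITION & SPEC =====
def Spec_get_prompt_matrix (prompt : String) (system_prompts : Option (List String)) (prompt_prefixes : Option (List String)) (out : List (List (List (String × String)))) : Prop := out = get_prompt_matrix_alt prompt system_prompts prompt_prefixes
instance (prompt : String) (system_prompts : Option (List String)) (prompt_prefixes : Option (List String)) (out : List (List (List (String × String)))) : Decidable (Spec_get_prompt_matrix prompt system_prompts prompt_prefixes out) := by unfold Spec_get_prompt_matrix; infer_instance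

-- ===== CLAIM (what is proved, stated in full; the proofs are below) =====
def Claim_equal_get_prompt_matrix : Prop := ∀ (prompt : String) (system_prompts : Option (List String)) (prompt_prefixes : Option (List String)), Dom_get_prompt_matrix prompt system_prompts prompt_prefixes → Spec_get_prompt_matrix prompt system_prompts prompt_prefixes (get_prompt_matrix prompt system_prompts prompt_prefixes)

-- ===== LEMMAS AND PROOFS =====

theorem pvFlatMap_singleton {α β : Type} (f : α → β) (l : List α) :
    l.flatMap (fun x => [f x]) = l.map f := by
  induction l <;> simp_all

theorem pvFlatten_map_singleton {α β : Type} (f : α → β) (l : List α) :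
    (l.map (fun x => [f x])).flatten = l.map f := by
  induction l <;> simp_all

-- A's prefix loop over a system-row matrix, unfolded by induction on the system-prompt list
theorem pvA_sys_pref (prompt : String) (l : List String) (p : String) (ps : List String)
    (acc : List (List (List (String × String)))) :
    (l.map (fun sp => [[("role", "system"), ("content", sp)], [("role", "user"), ("content", prompt)]])).foldl
      (fun new_matrix messages =>
        let user_message := (PySem.List.enumerate messages).filter
          (fun im => pvLookup im.2 "role" == "user")
        match user_message with
        | [(idx, msg)] =>
            (p :: ps).foldl (fun nm prefix_ =>
              nm ++ [PySem.List.slice messages none (some idx) ++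
                     [[("role", "user"), ("content", prefix_ ++ pvLookup msg "content")]] ++
                     PySem.List.slice messages (some (idx + 1)) none]) new_matrix
        | _ => new_matrix) acc
    = acc ++ l.flatMap (fun sp => (p :: ps).map (fun pre =>
        [[("role", "system"), ("content", sp)], [("role", "user"), ("content", pre ++ prompt)]])) := by
  induction l generalizing acc with
  | nil => simp
  | cons s ss ih =>
      rw [List.map_cons, List.foldl_cons, ih, List.flatMap_cons]
      simp [PySem.List.enumerate, pvLookup, PySem.List.slice,
        pvFlatten_map_singleton, List.append_assoc]

-- ===== VERDICT (by name: the statement is the Claim_ definition above) =====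
theorem get_prompt_matrix_spec : Claim_equal_get_prompt_matrix := by
  intro prompt sys pref _
  show get_prompt_matrix prompt sys pref = get_prompt_matrix_alt prompt sys pref
  match sys, pref with
  | none, none =>
      simp [get_prompt_matrix, get_prompt_matrix_alt, pvNormalize]
  | none, some [] =>
      simp [get_prompt_matrix, get_prompt_matrix_alt, pvNormalize]
  | some [], none =>
      simp [get_prompt_matrix, get_prompt_matrix_alt, pvNormalize]
  | some [], some [] =>
      simp [get_prompt_matrix, get_prompt_matrix_alt, pvNormalize]
  | some (s :: ss), none =>
      simp [get_prompt_matrix, get_prompt_matrix_alt, pvNormalize, List.flatMap_map,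
        pvFlatMap_singleton]
  | some (s :: ss), some [] =>
      simp [get_prompt_matrix, get_prompt_matrix_alt, pvNormalize, List.flatMap_map,
        pvFlatMap_singleton]
  | none, some (p :: ps) =>
      simp [get_prompt_matrix, get_prompt_matrix_alt, pvNormalize, PySem.List.enumerate, pvLookup,
        PySem.List.slice, Function.comp_def, pvFlatten_map_singleton]
  | some [], some (p :: ps) =>
      simp [get_prompt_matrix, get_prompt_matrix_alt, pvNormalize, PySem.List.enumerate, pvLookup,
        PySem.List.slice, Function.comp_def, pvFlatten_map_singleton]
  | some (s :: ss), some (p :: ps) =>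
      simp only [get_prompt_matrix, get_prompt_matrix_alt, pvNormalize, List.headD]
      rw [pvA_sys_pref]
      simp [List.flatMap_map, Function.comp_def]
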